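-- pv_equiv track=rewrite | github.com/Arvind125/optum-coding-round-1 | index.py | removeMainKeys
-- ===== SOURCE A (Python) =====
-- def removeMainKeys(dict):
--     d1 = {}
--     for key in dict:
--         if key == "NLP_VERSION" or key == "NPI" or key == "hw_pages":
--             pass
--         else:
--             d1[key] = dict[key]
--     return d1
-- ===== SOURCE B (Python) =====
-- def removeMainKeys(dict):
--     d1 = dict.copy()
--     d1.pop("NLP_VERSION", None)
--     d1.pop("NPI", None)
--     d1.pop("hw_pages", None)
--     return d1
-- ===== Notes on version B (the rewrite author's own statement) =====
-- stated objective: idiomatic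
-- what changed: Instead of A's element-by-element filtering loop that rebuilds a new dict with a membership branch, B shallow-copies the whole dict once and deletes the three excluded keys with pop(key, None).
import Mathlib
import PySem

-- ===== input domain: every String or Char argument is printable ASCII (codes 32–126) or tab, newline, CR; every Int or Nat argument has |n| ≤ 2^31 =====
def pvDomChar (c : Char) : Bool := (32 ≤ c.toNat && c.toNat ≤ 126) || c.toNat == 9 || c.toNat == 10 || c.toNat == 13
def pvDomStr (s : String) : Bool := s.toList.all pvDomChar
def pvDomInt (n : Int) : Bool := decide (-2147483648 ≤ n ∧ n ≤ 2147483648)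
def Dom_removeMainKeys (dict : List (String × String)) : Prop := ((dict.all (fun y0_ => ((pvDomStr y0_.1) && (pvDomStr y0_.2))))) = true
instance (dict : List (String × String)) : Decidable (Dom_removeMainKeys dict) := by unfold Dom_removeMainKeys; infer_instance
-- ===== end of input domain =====

-- B replaces A's per-entry filtering loop by a whole-dict copy followed by three targeted pop(key, None) deletions (idiomatic; same cost).


-- ===== PORT A =====
-- A iterates over the dict's keys and copies each non-excluded entry into a fresh dict.
def removeMainKeys (dict : List (String × String)) : List (String × String) :=
  let d := PySem.Dict.ofList dict
  (d.items.foldl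
    (fun d1 p =>
      if p.1 = "NLP_VERSION" ∨ p.1 = "NPI" ∨ p.1 = "hw_pages" then d1
      else d1.insert p.1 p.2)
    PySem.Dict.empty).items

-- ===== PORT B =====
-- B copies the whole dict, then pops the three excluded keys (pop with default = erase, never raises).
def removeMainKeys_alt (dict : List (String × String)) : List (String × String) :=
  let d1 := PySem.Dict.ofList dict
  (((d1.erase "NLP_VERSION").erase "NPI").erase "hw_pages").items

-- ===== PRECONDITION & SPEC =====
def Spec_removeMainKeys (dict : List (String × String)) (out : List (String × String)) : Prop := out = removeMainKeys_alt dict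
instance (dict : List (String × String)) (out : List (String × String)) : Decidable (Spec_removeMainKeys dict out) := by unfold Spec_removeMainKeys; infer_instance

-- ===== CLAIM (what is proved, stated in full; the proofs are below) =====
def Claim_equal_removeMainKeys : Prop := ∀ (dict : List (String × String)), Dom_removeMainKeys dict → Spec_removeMainKeys dict (removeMainKeys dict)

-- ===== LEMMAS AND PROOFS =====

-- A fold that either keeps the accumulator or inserts, restated as a fold over the kept pairs.
theorem foldl_keep_or_insert (l : List (String × String)) (d : PySem.Dict String String) :
    l.foldl
      (fun d1 p =>
        if p.1 = "NLP_VERSION" ∨ p.1 = "NPI" ∨ p.1 = "hw_pages" then d1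
        else d1.insert p.1 p.2)
      d
    = (l.filter (fun p => !(p.1 == "NLP_VERSION") && !(p.1 == "NPI") && !(p.1 == "hw_pages"))).foldl
        (fun d1 p => d1.insert p.1 p.2) d := by
  induction l generalizing d with
  | nil => rfl
  | cons p t ih =>
    simp only [List.foldl_cons, List.filter_cons]
    by_cases h : p.1 = "NLP_VERSION" ∨ p.1 = "NPI" ∨ p.1 = "hw_pages"
    · have : (!(p.1 == "NLP_VERSION") && !(p.1 == "NPI") && !(p.1 == "hw_pages")) = false := by
        rcases h with h | h | h <;> simp [h]
      simp [h, this, ih]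
    · push Not at h
      have : (!(p.1 == "NLP_VERSION") && !(p.1 == "NPI") && !(p.1 == "hw_pages")) = true := by
        simp [h.1, h.2.1, h.2.2]
      simp [h.1, h.2.1, h.2.2, this, ih]

-- ===== VERDICT (by name: the statement is the Claim_ definition above) =====
theorem removeMainKeys_spec : Claim_equal_removeMainKeys := by
  intro dict _
  unfold Spec_removeMainKeys removeMainKeys removeMainKeys_alt
  simp only []
  rw [foldl_keep_or_insert]
  set l := (PySem.Dict.ofList dict).items with hl
  have hnd : ((PySem.Dict.ofList dict).items.map Prod.fst).Nodup :=
    PySem.Dict.nodup_keys_ofList dict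
  have hfil := hnd
  have key : ((l.filter (fun p => !(p.1 == "NLP_VERSION") && !(p.1 == "NPI") && !(p.1 == "hw_pages"))).foldl
      (fun d1 p => d1.insert p.1 p.2) PySem.Dict.empty).items
      = l.filter (fun p => !(p.1 == "NLP_VERSION") && !(p.1 == "NPI") && !(p.1 == "hw_pages")) := by
    have h1 := PySem.Dict.items_foldl_insert_fresh
      (l := l.filter (fun p => !(p.1 == "NLP_VERSION") && !(p.1 == "NPI") && !(p.1 == "hw_pages")))
      (k := Prod.fst) (v := Prod.snd) (d := PySem.Dict.empty)
      (by intro a _; simp [PySem.Dict.contains_empty])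
      (by
        have hsub : (l.filter (fun p => !(p.1 == "NLP_VERSION") && !(p.1 == "NPI") && !(p.1 == "hw_pages"))).map Prod.fst
            |>.Sublist (l.map Prod.fst) := (List.filter_sublist (l := l)).map Prod.fst
        exact hsub.nodup hnd)
    simpa using h1
  rw [key]
  simp [PySem.Dict.erase, List.filter_filter]
  apply List.filter_congr
  intro p _
  cases hp1 : (p.1 == "NLP_VERSION") <;> cases hp2 : (p.1 == "NPI") <;> cases hp3 : (p.1 == "hw_pages") <;> simp
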